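-- pv_equiv track=rewrite | github.com/Rautabout/Mat_tlumacz | Python/MathMlToTree.py | checkIfEndBracketExistBetweenSpecial
-- ===== SOURCE A (Python) =====
-- mathMlSymbolClosedRow = "}"
--
-- def checkIfEndBracketExistBetweenSpecial(inputString, closingSymbols):
--     output = ''
--     indexOfNextStart = 0
--
--     for i in range(len(inputString)):
--         for keyValue in closingSymbols:
--             if inputString[i:(i + len(keyValue))] == keyValue:
--                 if (inputString[(i - len(mathMlSymbolClosedRow) - 1):i - 1]) == mathMlSymbolClosedRow:
--                     output += inputString[indexOfNextStart:i]
--                     indexOfNextStart = i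
--                 else:
--                     output += inputString[indexOfNextStart:i]
--                     indexOfNextStart = i + len(keyValue)
--     if (indexOfNextStart < len(inputString)):
--         output += inputString[indexOfNextStart:]
--     return output
-- ===== SOURCE B (Python) =====
-- def checkIfEndBracketExistBetweenSpecial(inputString, closingSymbols):
--     n = len(inputString)
--     # Phase 1: index all match positions with str.find (symbol-major), grouped by position.
--     occ = {}
--     for kv in closingSymbols:
--         p = inputString.find(kv)
--         while p != -1 and p < n:
--             occ.setdefault(p, []).append(kv)
--             p = inputString.find(kv, p + 1)
--     # Phase 2: replay the events in (position, symbol-order) order.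
--     pieces = []
--     start = 0
--     for i in sorted(occ):
--         for kv in occ[i]:
--             pieces.append(inputString[start:i])
--             if inputString[i - 2:i - 1] == '}':
--                 start = i
--             else:
--                 start = i + len(kv)
--     if start < n:
--         pieces.append(inputString[start:])
--     return ''.join(pieces)
-- ===== Notes on version B (the rewrite author's own statement) =====
-- stated objective: faster
-- what changed: A scans every index and re-slices for every symbol at every position; B first builds an occurrence index with repeated str.find (symbol-major, grouped by position in a dict), then replays the events over the sorted positions in A's (position, symbol-order) order.
import Mathlib
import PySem

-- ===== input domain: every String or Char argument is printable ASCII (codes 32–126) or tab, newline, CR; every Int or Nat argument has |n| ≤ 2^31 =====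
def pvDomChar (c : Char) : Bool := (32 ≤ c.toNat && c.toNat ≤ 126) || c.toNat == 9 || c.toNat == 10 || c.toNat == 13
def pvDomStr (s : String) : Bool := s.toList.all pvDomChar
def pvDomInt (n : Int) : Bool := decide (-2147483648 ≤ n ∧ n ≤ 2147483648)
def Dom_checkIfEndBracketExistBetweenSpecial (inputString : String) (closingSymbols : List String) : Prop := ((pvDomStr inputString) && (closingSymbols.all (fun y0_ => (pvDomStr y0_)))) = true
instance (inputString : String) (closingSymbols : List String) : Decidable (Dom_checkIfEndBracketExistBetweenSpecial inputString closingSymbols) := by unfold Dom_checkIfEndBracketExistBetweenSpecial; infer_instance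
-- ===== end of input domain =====

-- B replaces A's index-major nested scan by a find-based occurrence index (position -> matching
-- symbols, symbol-major) replayed over the sorted positions; same return value, measured faster.

-- ===== PORT A =====
-- module constant used by A
def mathMlSymbolClosedRow : String := "}"

def checkIfEndBracketExistBetweenSpecial (inputString : String) (closingSymbols : List String) : String :=
  let cs := inputString.toList
  let st := (PySem.List.pyRange 0 (cs.length : Int) 1).foldl
    (fun (st : List Char × Int) i =>
      closingSymbols.foldl
        (fun (st : List Char × Int) kv =>
          if PySem.Chars.slice cs (some i) (some (i + (kv.toList.length : Int))) = kv.toList then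
            if PySem.Chars.slice cs (some (i - (mathMlSymbolClosedRow.toList.length : Int) - 1)) (some (i - 1)) = mathMlSymbolClosedRow.toList then
              (st.1 ++ PySem.Chars.slice cs (some st.2) (some i), i)
            else
              (st.1 ++ PySem.Chars.slice cs (some st.2) (some i), i + (kv.toList.length : Int))
          else st)
        st)
    (([] : List Char), (0 : Int))
  let out := if st.2 < (cs.length : Int) then st.1 ++ PySem.Chars.slice cs (some st.2) none else st.1
  String.ofList out

-- ===== PORT B =====
-- the 'while p != -1 and p < n' find loop of Source B; str.find only returns -1 or an index >= 0,
-- so 'p != -1' is ported as '0 <= p'; fuel (= n+1, an upper bound on the strictly increasing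
-- positions the loop can visit) only makes the recursion structural, it never cuts it short.
def pvAltFindLoop (cs : List Char) (kv : String) (occ : PySem.Dict Int (List String)) (p : Int) (fuel : Nat) : PySem.Dict Int (List String) :=
  match fuel with
  | 0 => occ
  | Nat.succ fuel =>
    if 0 ≤ p ∧ p < (cs.length : Int) then
      -- occ.setdefault(p, []).append(kv)  ==  occ[p] = occ.get(p, []) + [kv]
      pvAltFindLoop cs kv (occ.modify p [] (· ++ [kv])) (PySem.Chars.findFrom cs kv.toList (p + 1)) fuel
    else occ

def checkIfEndBracketExistBetweenSpecial_alt (inputString : String) (closingSymbols : List String) : String :=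
  let cs := inputString.toList
  let occ := closingSymbols.foldl
    (fun occ kv => pvAltFindLoop cs kv occ (PySem.Chars.find cs kv.toList) (cs.length + 1)) PySem.Dict.empty
  let st := (PySem.List.sorted occ.keys (fun x => x) false).foldl
    (fun (st : List (List Char) × Int) i =>
      (occ.getD i []).foldl
        (fun (st : List (List Char) × Int) kv =>
          let st1 := st.1 ++ [PySem.Chars.slice cs (some st.2) (some i)]
          if PySem.Chars.slice cs (some (i - 2)) (some (i - 1)) = ['}'] then (st1, i)
          else (st1, i + (kv.toList.length : Int)))
        st)
    (([] : List (List Char)), (0 : Int))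
  let pieces := if st.2 < (cs.length : Int) then st.1 ++ [PySem.Chars.slice cs (some st.2) none] else st.1
  String.ofList (PySem.Chars.join [] pieces)

-- ===== PRECONDITION & SPEC =====
def Spec_checkIfEndBracketExistBetweenSpecial (inputString : String) (closingSymbols : List String) (out : String) : Prop := out = checkIfEndBracketExistBetweenSpecial_alt inputString closingSymbols
instance (inputString : String) (closingSymbols : List String) (out : String) : Decidable (Spec_checkIfEndBracketExistBetweenSpecial inputString closingSymbols out) := by unfold Spec_checkIfEndBracketExistBetweenSpecial; infer_instance

-- ===== CLAIM (what is proved, stated in full; the proofs are below) =====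
def Claim_equal_checkIfEndBracketExistBetweenSpecial : Prop := ∀ (inputString : String) (closingSymbols : List String), Dom_checkIfEndBracketExistBetweenSpecial inputString closingSymbols → Spec_checkIfEndBracketExistBetweenSpecial inputString closingSymbols (checkIfEndBracketExistBetweenSpecial inputString closingSymbols)

-- ===== LEMMAS AND PROOFS =====

-- the match predicate: does symbol kv occur at position j of cs?
def pvMatch (cs : List Char) (kv : String) (j : Nat) : Bool := decide (kv.toList <+: cs.drop j)

-- positions of cs at which kv matches, ascending
def pvPos (cs : List Char) (kv : String) : List Nat := (List.range cs.length).filter (pvMatch cs kv)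

-- the shared event step, on A's state shape
def pvStepA (cs : List Char) (st : List Char × Int) (e : Nat × String) : List Char × Int :=
  if PySem.Chars.slice cs (some ((e.1 : Int) - 2)) (some ((e.1 : Int) - 1)) = ['}'] then
    (st.1 ++ PySem.Chars.slice cs (some st.2) (some (e.1 : Int)), (e.1 : Int))
  else
    (st.1 ++ PySem.Chars.slice cs (some st.2) (some (e.1 : Int)), (e.1 : Int) + (e.2.toList.length : Int))

-- the shared event step, on B's state shape
def pvStepB (cs : List Char) (st : List (List Char) × Int) (e : Nat × String) : List (List Char) × Int :=
  if PySem.Chars.slice cs (some ((e.1 : Int) - 2)) (some ((e.1 : Int) - 1)) = ['}'] then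
    (st.1 ++ [PySem.Chars.slice cs (some st.2) (some (e.1 : Int))], (e.1 : Int))
  else
    (st.1 ++ [PySem.Chars.slice cs (some st.2) (some (e.1 : Int))], (e.1 : Int) + (e.2.toList.length : Int))

-- the event list both programs process, in (position, symbol-order) order
def pvEvents (cs : List Char) (syms : List String) : List (Nat × String) :=
  (List.range cs.length).flatMap
    (fun j => (syms.filter (fun kv => pvMatch cs kv j)).map (fun kv => (j, kv)))

-- B's occurrence dictionary, and the flat event list (ordered symbol-major) that builds it
def pvOcc (cs : List Char) (syms : List String) : PySem.Dict Int (List String) :=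
  syms.foldl (fun occ kv => pvAltFindLoop cs kv occ (PySem.Chars.find cs kv.toList) (cs.length + 1)) PySem.Dict.empty

def pvE (cs : List Char) (syms : List String) : List (Int × String) :=
  syms.flatMap (fun kv => (pvPos cs kv).map (fun j : Nat => ((j : Int), kv)))

-- positions at which at least one symbol matches, ascending
def pvPosAll (cs : List Char) (syms : List String) : List Nat :=
  (List.range cs.length).filter (fun j => syms.any (fun kv => pvMatch cs kv j))

theorem slice_eq_iff_prefix (cs : List Char) (kv : List Char) (j : Nat) :
    PySem.Chars.slice cs (some (j : Int)) (some ((j : Int) + (kv.length : Int))) = kv ↔ kv <+: cs.drop j := by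
  rw [PySem.Chars.slice_eq_listSlice, PySem.List.slice_natCast_add]
  constructor
  · intro h; rw [← h]; exact List.take_prefix _ _
  · intro h; exact (List.prefix_iff_eq_take.mp h).symm

theorem pvFilter_eq_singleton (l : List Nat) (hN : l.Nodup) (j : Nat) :
    l.filter (fun x => x == j) = if j ∈ l then [j] else [] := by
  induction l with
  | nil => simp
  | cons a as ih =>
    simp only [List.nodup_cons] at hN
    by_cases haj : a = j
    · subst haj
      have has : (as.filter (fun x => x == a)) = [] := by
        rw [ih hN.2, if_neg hN.1]
      simp [has]
    · simp [haj, ih hN.2, List.mem_cons, Ne.symm haj]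

theorem pvFlatMap_filter_eq {α β : Type} (l : List α) (q : α → Bool) (f : α → List β)
    (h : ∀ x ∈ l, q x = false → f x = []) :
    (l.filter q).flatMap f = l.flatMap f := by
  induction l with
  | nil => rfl
  | cons a as ih =>
    rw [List.filter_cons]
    by_cases hq : q a = true
    · simp only [hq, if_true, List.flatMap_cons]
      rw [ih (fun x hx hfx => h x (List.mem_cons_of_mem _ hx) hfx)]
    · have hfa : f a = [] := h a (List.mem_cons_self) (by simpa using hq)
      simp only [hq, List.flatMap_cons, hfa, List.nil_append]
      exact ih (fun x hx hfx => h x (List.mem_cons_of_mem _ hx) hfx)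

theorem filter_ge_split_list (l : List Nat) (k m : Nat) (hkm : k ≤ m)
    (hs : l.Pairwise (· < ·)) (hm : m ∈ l) (hmin : ∀ j ∈ l, k ≤ j → ¬ j < m) :
    l.filter (fun j => decide (k ≤ j)) = m :: l.filter (fun j => decide (m + 1 ≤ j)) := by
  induction l with
  | nil => cases hm
  | cons a as ih =>
    rw [List.pairwise_cons] at hs
    rcases List.mem_cons.mp hm with rfl | hmas
    · rw [List.filter_cons, List.filter_cons]
      rw [if_pos (by simpa using hkm), if_neg (by simp)]
      congr 1
      apply List.filter_congr
      intro j hj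
      have hlt := hs.1 j hj
      simp only [decide_eq_decide]
      omega
    · have ham : a < m := hs.1 m hmas
      have hak : ¬ k ≤ a := fun hka => hmin a (List.mem_cons_self) hka ham
      rw [List.filter_cons, List.filter_cons]
      rw [if_neg (by simpa using hak), if_neg (by simp; omega)]
      exact ih hs.2 hmas (fun j hj hkj => hmin j (List.mem_cons_of_mem _ hj) hkj)

theorem findLoop_eq_foldl (cs : List Char) (kv : String) :
    ∀ (fuel k : Nat) (occ : PySem.Dict Int (List String)), k ≤ cs.length → cs.length - k < fuel →
      pvAltFindLoop cs kv occ (PySem.Chars.findFrom cs kv.toList (k : Int)) fuel =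
        ((pvPos cs kv).filter (fun j => decide (k ≤ j))).foldl (fun occ j => occ.modify (j : Int) [] (· ++ [kv])) occ := by
  intro fuel
  induction fuel with
  | zero => intro k occ hk hM; omega
  | succ M ih =>
    intro k occ hk hM
    rw [pvAltFindLoop]
    by_cases h1 : PySem.Chars.findFrom cs kv.toList (k : Int) = -1
    · rw [if_neg (by rw [h1]; omega)]
      have hnomatch : ∀ j ∈ pvPos cs kv, ¬ k ≤ j := by
        intro j hjmem hkj
        simp only [pvPos, List.mem_filter, List.mem_range, pvMatch, decide_eq_true_eq] at hjmem
        obtain ⟨hjn, hpre⟩ := hjmem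
        have h2 : cs.drop j = (cs.drop k).drop (j - k) := by rw [List.drop_drop]; congr 1; omega
        rw [h2] at hpre
        have hinf : kv.toList <:+: cs.drop k :=
          hpre.isInfix.trans (List.drop_suffix _ _).isInfix
        exact (PySem.Chars.findFrom_natCast_eq_neg_one_iff cs kv.toList k hk).mp h1 hinf
      rw [List.filter_eq_nil_iff.mpr (by intro j hj; simpa using hnomatch j hj)]
      rfl
    · obtain ⟨hkr, hpre, hmin⟩ := PySem.Chars.findFrom_natCast_spec cs kv.toList k hk h1
      set r := PySem.Chars.findFrom cs kv.toList (k : Int) with hr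
      have hr0 : 0 ≤ r := le_trans (by omega) hkr
      by_cases h2 : r < (cs.length : Int)
      · rw [if_pos ⟨hr0, h2⟩]
        have hc : r + 1 = ((r.toNat + 1 : Nat) : Int) := by omega
        have hkn : r.toNat + 1 ≤ cs.length := by omega
        rw [hc, ih (r.toNat + 1) _ hkn (by omega)]
        have hmmem : r.toNat ∈ pvPos cs kv := by
          simp only [pvPos, List.mem_filter, List.mem_range, pvMatch, decide_eq_true_eq]
          exact ⟨by omega, hpre⟩
        have hsplit := filter_ge_split_list (pvPos cs kv) k r.toNat (by omega)
          (List.Pairwise.filter _ List.pairwise_lt_range) hmmem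
          (by
            intro j hj hkj hjlt
            simp only [pvPos, List.mem_filter, List.mem_range, pvMatch, decide_eq_true_eq] at hj
            exact hmin j hkj hjlt hj.2)
        rw [hsplit, List.foldl_cons, Int.toNat_of_nonneg hr0]
      · rw [if_neg (by omega)]
        have hnil : (pvPos cs kv).filter (fun j => decide (k ≤ j)) = [] := by
          apply List.filter_eq_nil_iff.mpr
          intro j hj
          simp only [pvPos, List.mem_filter, List.mem_range, pvMatch, decide_eq_true_eq] at hj
          simp only [decide_eq_true_eq]
          intro hkj
          exact hmin j hkj (by omega) hj.2
        rw [hnil]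
        rfl

theorem inner_eq (cs : List Char) (closingSymbols : List String) (st : List Char × Int) (j : Nat) :
    closingSymbols.foldl
      (fun (st : List Char × Int) kv =>
        if PySem.Chars.slice cs (some (j : Int)) (some ((j : Int) + (kv.toList.length : Int))) = kv.toList then
          if PySem.Chars.slice cs (some ((j : Int) - (mathMlSymbolClosedRow.toList.length : Int) - 1)) (some ((j : Int) - 1)) = mathMlSymbolClosedRow.toList then
            (st.1 ++ PySem.Chars.slice cs (some st.2) (some (j : Int)), (j : Int))
          else
            (st.1 ++ PySem.Chars.slice cs (some st.2) (some (j : Int)), (j : Int) + (kv.toList.length : Int))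
        else st) st
    = ((closingSymbols.filter (fun kv => pvMatch cs kv j)).map (fun kv => (j, kv))).foldl (pvStepA cs) st := by
  rw [List.foldl_map]
  have hfil : closingSymbols.filter (fun kv => pvMatch cs kv j)
      = closingSymbols.filter (fun kv => decide (PySem.Chars.slice cs (some (j : Int)) (some ((j : Int) + (kv.toList.length : Int))) = kv.toList)) := by
    apply List.filter_congr
    intro kv _
    simp only [pvMatch]
    exact decide_eq_decide.mpr (slice_eq_iff_prefix cs kv.toList j).symm
  rw [hfil, ← PySem.List.foldl_ite_eq_foldl_filter
      (fun kv => PySem.Chars.slice cs (some (j : Int)) (some ((j : Int) + (kv.toList.length : Int))) = kv.toList)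
      (fun st kv => pvStepA cs st (j, kv))]
  apply PySem.List.foldl_congr_mem
  intro acc kv _
  have hlen : (mathMlSymbolClosedRow.toList.length : Int) = 1 := by decide
  have hidx : (j : Int) - (mathMlSymbolClosedRow.toList.length : Int) - 1 = (j : Int) - 2 := by
    rw [hlen]; ring
  have hcl : mathMlSymbolClosedRow.toList = ['}'] := by decide
  rw [hidx, hcl]
  simp only [pvStepA]

theorem portA_eq_events (inputString : String) (closingSymbols : List String) :
    checkIfEndBracketExistBetweenSpecial inputString closingSymbols =
      (let cs := inputString.toList
       let st := (pvEvents cs closingSymbols).foldl (pvStepA cs) ([], 0)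
       String.ofList (if st.2 < (cs.length : Int) then st.1 ++ PySem.Chars.slice cs (some st.2) none else st.1)) := by
  simp only [checkIfEndBracketExistBetweenSpecial, pvEvents]
  rw [PySem.List.pyRange_zero_natCast, List.foldl_map, List.foldl_flatMap]
  rw [PySem.List.foldl_congr_mem _ _ _ _
      (fun st j _ => inner_eq inputString.toList closingSymbols st j)]

theorem pvOcc_eq (cs : List Char) (syms : List String) :
    pvOcc cs syms = (pvE cs syms).foldl (fun d p => d.modify p.1 [] (fun x => x ++ [p.2])) PySem.Dict.empty := by
  simp only [pvOcc, pvE]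
  rw [List.foldl_flatMap]
  apply PySem.List.foldl_congr_mem
  intro occ kv _
  rw [List.foldl_map]
  have h0 : PySem.Chars.find cs kv.toList = PySem.Chars.findFrom cs kv.toList ((0 : Nat) : Int) := by
    rw [Nat.cast_zero, PySem.Chars.findFrom_zero]
  rw [h0, findLoop_eq_foldl cs kv (cs.length + 1) 0 occ (Nat.zero_le _) (by omega)]
  have hfil : (pvPos cs kv).filter (fun j => decide (0 ≤ j)) = pvPos cs kv := by
    apply List.filter_eq_self.mpr
    intro j _
    simp
  rw [hfil]

theorem pvE_filter_snd (cs : List Char) (syms : List String) (j : Nat) (hj : j < cs.length) :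
    (List.filter (fun p : Int × String => p.1 == (j : Int)) (pvE cs syms)).map (fun x => x.2)
      = syms.filter (fun kv => pvMatch cs kv j) := by
  induction syms with
  | nil => rfl
  | cons kv rest ih =>
    have hhead : (List.filter (fun p : Int × String => p.1 == (j : Int))
          ((pvPos cs kv).map (fun i : Nat => ((i : Int), kv)))).map (fun x : Int × String => x.2)
        = if pvMatch cs kv j then [kv] else [] := by
      rw [List.filter_map]
      have hcongr : List.filter ((fun p : Int × String => p.1 == (j : Int)) ∘ (fun i : Nat => ((i : Int), kv))) (pvPos cs kv)
          = List.filter (fun x => x == j) (pvPos cs kv) := by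
        apply List.filter_congr
        intro x _
        simp [Function.comp]
      have hnd : (pvPos cs kv).Nodup := List.Nodup.filter _ List.nodup_range
      rw [hcongr, pvFilter_eq_singleton (pvPos cs kv) hnd j]
      by_cases hm : pvMatch cs kv j = true
      · rw [if_pos (by simp only [pvPos, List.mem_filter, List.mem_range]; exact ⟨hj, hm⟩), if_pos hm]
        simp
      · rw [if_neg (by simp only [pvPos, List.mem_filter, List.mem_range]; intro h; exact hm h.2), if_neg hm]
        simp
    rw [show pvE cs (kv :: rest) = (pvPos cs kv).map (fun i : Nat => ((i : Int), kv)) ++ pvE cs rest from by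
        simp [pvE, List.flatMap_cons]]
    rw [List.filter_append, List.map_append, hhead, ih, List.filter_cons]
    by_cases hm : pvMatch cs kv j = true <;> simp [hm]

theorem pvOcc_getD (cs : List Char) (syms : List String) (j : Nat) (hj : j < cs.length) :
    (pvOcc cs syms).getD (j : Int) [] = syms.filter (fun kv => pvMatch cs kv j) := by
  rw [pvOcc_eq, PySem.Dict.getD_foldl_modify_append]
  rw [show (PySem.Dict.empty : PySem.Dict Int (List String)).getD (j : Int) [] = [] from rfl, List.nil_append]
  exact pvE_filter_snd cs syms j hj

theorem pvOcc_keys (cs : List Char) (syms : List String) :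
    (pvOcc cs syms).keys = PySem.Set.ofList ((pvE cs syms).map (fun p => p.1)) := by
  rw [pvOcc_eq]
  have h := PySem.Dict.keys_foldl_modify_key (pvE cs syms) (fun p : Int × String => p.1) []
      (fun _ p => (fun x => x ++ [p.2])) PySem.Dict.empty
  simp only [] at h
  rw [h]
  simp [PySem.Set.update_eq_append_filter]

theorem pvSortedKeys (cs : List Char) (syms : List String) :
    PySem.List.sorted (pvOcc cs syms).keys (fun x => x) false = (pvPosAll cs syms).map (fun j : Nat => (j : Int)) := by
  apply PySem.List.sorted_eq_of_perm_of_pairwise_lt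
  · rw [pvOcc_keys]
    have hnd : ((pvPosAll cs syms).map (fun j : Nat => (j : Int))).Nodup :=
      List.Nodup.map (fun a b h => by exact_mod_cast h) (List.Nodup.filter _ List.nodup_range)
    apply (List.perm_ext_iff_of_nodup hnd (PySem.Set.nodup_ofList _)).mpr
    intro x
    simp only [pvPosAll, pvE, pvPos, PySem.Set.mem_ofList, List.mem_map, List.mem_flatMap,
      List.mem_filter, List.mem_range, List.any_eq_true]
    constructor
    · rintro ⟨j, ⟨hjn, kv, hkv, hm⟩, rfl⟩
      exact ⟨((j : Int), kv), ⟨kv, hkv, j, ⟨hjn, hm⟩, rfl⟩, rfl⟩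
    · rintro ⟨p, ⟨kv, hkv, j, ⟨hjn, hm⟩, rfl⟩, rfl⟩
      exact ⟨j, ⟨hjn, kv, hkv, hm⟩, rfl⟩
  · rw [List.pairwise_map]
    exact List.Pairwise.imp (fun h => by exact_mod_cast h) (List.Pairwise.filter _ List.pairwise_lt_range)

theorem foldB_lift (cs : List Char) (syms : List String) :
    (PySem.List.sorted (pvOcc cs syms).keys (fun x => x) false).foldl
      (fun (st : List (List Char) × Int) i =>
        ((pvOcc cs syms).getD i []).foldl
          (fun (st : List (List Char) × Int) kv =>
            let st1 := st.1 ++ [PySem.Chars.slice cs (some st.2) (some i)]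
            if PySem.Chars.slice cs (some (i - 2)) (some (i - 1)) = ['}'] then (st1, i)
            else (st1, i + (kv.toList.length : Int))) st)
      ([], 0)
    = (pvEvents cs syms).foldl (pvStepB cs) ([], 0) := by
  rw [pvSortedKeys, List.foldl_map]
  have hev : (pvPosAll cs syms).flatMap
      (fun j => (syms.filter (fun kv => pvMatch cs kv j)).map (fun kv => (j, kv))) = pvEvents cs syms := by
    simp only [pvPosAll, pvEvents]
    apply pvFlatMap_filter_eq
    intro j _ hq
    have hnil : syms.filter (fun kv => pvMatch cs kv j) = [] :=
      List.filter_eq_nil_iff.mpr (fun kv hkv => by simpa using (List.any_eq_false.mp hq) kv hkv)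
    rw [hnil, List.map_nil]
  rw [← hev, List.foldl_flatMap]
  apply PySem.List.foldl_congr_mem
  intro st j hj
  have hjlt : j < cs.length := by
    simp only [pvPosAll, List.mem_filter, List.mem_range] at hj
    exact hj.1
  rw [pvOcc_getD cs syms j hjlt, List.foldl_map]
  apply PySem.List.foldl_congr_mem
  intro acc kv _
  simp only [pvStepB]

theorem portB_eq_events (inputString : String) (closingSymbols : List String) :
    checkIfEndBracketExistBetweenSpecial_alt inputString closingSymbols =
      (let cs := inputString.toList
       let st := (pvEvents cs closingSymbols).foldl (pvStepB cs) ([], 0)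
       String.ofList (PySem.Chars.join []
         (if st.2 < (cs.length : Int) then st.1 ++ [PySem.Chars.slice cs (some st.2) none] else st.1))) := by
  simp only [checkIfEndBracketExistBetweenSpecial_alt]
  have hO : (closingSymbols.foldl
      (fun occ kv => pvAltFindLoop inputString.toList kv occ (PySem.Chars.find inputString.toList kv.toList) (inputString.toList.length + 1))
      PySem.Dict.empty) = pvOcc inputString.toList closingSymbols := rfl
  simp only [hO]
  rw [foldB_lift]

theorem join_nil_eq_flatten (ps : List (List Char)) : PySem.Chars.join [] ps = ps.flatten := by
  induction ps with
  | nil => simp [PySem.Chars.join_nil]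
  | cons a rest ih =>
    cases rest with
    | nil => simp [PySem.Chars.join_singleton]
    | cons b r =>
      rw [PySem.Chars.join_cons_cons, ih]
      simp

theorem stepB_flatten (cs : List Char) (evts : List (Nat × String)) (acc : List (List Char)) (s0 : Int) :
    evts.foldl (pvStepA cs) (acc.flatten, s0) =
      ((evts.foldl (pvStepB cs) (acc, s0)).1.flatten, (evts.foldl (pvStepB cs) (acc, s0)).2) := by
  induction evts generalizing acc s0 with
  | nil => rfl
  | cons e es ih =>
    simp only [List.foldl_cons, pvStepA, pvStepB]
    split_ifs with hg
    · rw [show acc.flatten ++ PySem.Chars.slice cs (some s0) (some (e.1 : Int))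
          = (acc ++ [PySem.Chars.slice cs (some s0) (some (e.1 : Int))]).flatten from by simp]
      exact ih _ _
    · rw [show acc.flatten ++ PySem.Chars.slice cs (some s0) (some (e.1 : Int))
          = (acc ++ [PySem.Chars.slice cs (some s0) (some (e.1 : Int))]).flatten from by simp]
      exact ih _ _

-- ===== VERDICT (by name: the statement is the Claim_ definition above) =====
theorem checkIfEndBracketExistBetweenSpecial_spec : Claim_equal_checkIfEndBracketExistBetweenSpecial := by
  intro inputString closingSymbols _
  unfold Spec_checkIfEndBracketExistBetweenSpecial
  rw [portA_eq_events, portB_eq_events]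
  simp only []
  have h := stepB_flatten inputString.toList (pvEvents inputString.toList closingSymbols) [] 0
  simp only [List.flatten_nil] at h
  rw [h, join_nil_eq_flatten]
  split_ifs
  · simp [List.flatten_append]
  · rfl
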